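-- pv_equiv track=rewrite | github.com/codeteme/early-modern-english-modernization | scripts/align_text.py | split_by_file_markers
-- ===== SOURCE A (Python) =====
-- def split_by_file_markers(text):
--     """Split concatenated files by FILE: markers"""
--     sections = []
--     current = []
--
--     for line in text.splitlines():
--         if line.strip().startswith("FILE:"):
--             if current:
--                 sections.append("\n".join(current))
--                 current = []
--         current.append(line)
--
--     if current:
--         sections.append("\n".join(current))
--
--     return sections
-- ===== SOURCE B (Python) =====
-- def split_by_file_markers(text):
--     """Split concatenated files by FILE: markers (two-pointer grouping, no flush buffer)"""
--     lines = text.splitlines()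
--     sections = []
--     i = 0
--     n = len(lines)
--     while i < n:
--         j = i + 1
--         while j < n and not lines[j].strip().startswith("FILE:"):
--             j += 1
--         sections.append("\n".join(lines[i:j]))
--         i = j
--     return sections
-- ===== Notes on version B (the rewrite author's own statement) =====
-- stated objective: alternative
-- what changed: Replaces A's incremental flush-buffer accumulation with a two-pointer grouping: each section starts at a cut line and extends over the following non-marker lines, appended in one slice-and-join step.
import Mathlib
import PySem

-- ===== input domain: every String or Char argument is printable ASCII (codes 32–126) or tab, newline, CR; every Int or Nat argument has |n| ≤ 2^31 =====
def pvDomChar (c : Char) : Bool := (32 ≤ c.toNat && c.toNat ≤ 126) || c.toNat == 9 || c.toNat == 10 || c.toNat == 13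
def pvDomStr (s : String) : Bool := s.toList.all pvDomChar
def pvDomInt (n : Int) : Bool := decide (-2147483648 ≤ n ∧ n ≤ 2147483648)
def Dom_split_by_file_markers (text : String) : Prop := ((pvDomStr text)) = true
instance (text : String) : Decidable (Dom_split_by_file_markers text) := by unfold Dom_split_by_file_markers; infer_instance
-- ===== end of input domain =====

-- B replaces A's incremental flush-buffer accumulation with a two-pointer grouping (each
-- section = a cut line plus the following non-marker lines, emitted in one slice-and-join);
-- objective: alternative (same O(n) cost, different traversal structure).

-- shared trivial predicate: line.strip().startswith("FILE:")
def pvMarker (l : String) : Bool := PySem.Str.startswith (PySem.Str.strip l) "FILE:"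

-- ===== PORT A =====
-- one iteration of A's for-loop over (sections, current)
def pvStepA (st : List String × List String) (line : String) : List String × List String :=
  let st :=
    if pvMarker line then
      if st.2 ≠ [] then (st.1 ++ [PySem.Str.join "\n" st.2], ([] : List String)) else st
    else st
  (st.1, st.2 ++ [line])

-- A's trailing 'if current: sections.append(...)'
def pvFinishA (r : List String × List String) : List String :=
  if r.2 ≠ [] then r.1 ++ [PySem.Str.join "\n" r.2] else r.1

def split_by_file_markers (text : String) : List String :=
  pvFinishA ((PySem.Str.splitlines text).foldl pvStepA ([], []))

-- ===== PORT B =====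
-- outer while-iteration of Source B: one chunk = head line plus following non-marker lines
def pvChunks : List String → List (List String)
  | [] => []
  | l :: rest =>
      (l :: rest.takeWhile (fun s => !pvMarker s)) :: pvChunks (rest.dropWhile (fun s => !pvMarker s))
termination_by ls => ls.length
decreasing_by
  exact Nat.lt_succ_of_le (List.length_dropWhile_le _ _)

def split_by_file_markers_alt (text : String) : List String :=
  (pvChunks (PySem.Str.splitlines text)).map (PySem.Str.join "\n")

-- ===== PRECONDITION & SPEC =====
def Spec_split_by_file_markers (text : String) (out : List String) : Prop := out = split_by_file_markers_alt text
instance (text : String) (out : List String) : Decidable (Spec_split_by_file_markers text out) := by unfold Spec_split_by_file_markers; infer_instance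

-- ===== CLAIM (what is proved, stated in full; the proofs are below) =====
def Claim_equal_split_by_file_markers : Prop := ∀ (text : String), Dom_split_by_file_markers text → Spec_split_by_file_markers text (split_by_file_markers text)

-- ===== LEMMAS AND PROOFS =====

-- Loop invariant: with a nonempty buffer, finishing A's loop yields the pending sections,
-- then the buffer extended by the next non-marker run, then the chunks of the remainder.
lemma pv_loop_eq (lines : List String) :
    ∀ (secs cur : List String), cur ≠ [] →
    pvFinishA (lines.foldl pvStepA (secs, cur))
      = secs ++ ((cur ++ lines.takeWhile (fun s => !pvMarker s)) ::
                 pvChunks (lines.dropWhile (fun s => !pvMarker s))).map (PySem.Str.join "\n") := by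
  induction lines with
  | nil =>
      intro secs cur hcur
      simp [pvFinishA, hcur, pvChunks]
  | cons l rest ih =>
      intro secs cur hcur
      by_cases h : pvMarker l = true
      · have step : pvStepA (secs, cur) l = (secs ++ [PySem.Str.join "\n" cur], [l]) := by
          simp [pvStepA, h, hcur]
        rw [List.foldl_cons, step, ih _ [l] (by simp)]
        simp [pvChunks, h]
      · have step : pvStepA (secs, cur) l = (secs, cur ++ [l]) := by
          simp [pvStepA, h]
        rw [List.foldl_cons, step, ih _ (cur ++ [l]) (by simp)]
        simp [h]

-- first iteration: the buffer is empty, so no flush happens whatever the line is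
lemma pv_step_empty (secs : List String) (l : String) :
    pvStepA (secs, []) l = (secs, [l]) := by
  simp [pvStepA]

-- ===== VERDICT (by name: the statement is the Claim_ definition above) =====
theorem split_by_file_markers_spec : Claim_equal_split_by_file_markers := by
  intro text _
  unfold Spec_split_by_file_markers split_by_file_markers split_by_file_markers_alt
  cases hls : PySem.Str.splitlines text with
  | nil => simp [pvFinishA, pvChunks]
  | cons l rest =>
      rw [List.foldl_cons, pv_step_empty, pv_loop_eq rest [] [l] (by simp)]
      simp [pvChunks]
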